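-- pv_equiv track=rewrite | github.com/S3nna13/Aurelius | src/data/token_mixing.py | pack_sequences
-- ===== SOURCE A (Python) =====
-- from typing import Any, Dict, List, Optional
--
-- def pack_sequences(
--     sequences: List[List[int]],
--     seq_len: int,
--     eos_id: int,
-- ) -> List[List[int]]:
--     """Concatenate sequences with EOS tokens between them and chunk into fixed windows.
--
--     Sequences are joined as: seq0 + [eos_id] + seq1 + [eos_id] + ...
--     The resulting stream is then sliced into non-overlapping chunks of exactly
--     ``seq_len`` tokens.  Any partial last chunk is discarded (no padding).
--
--     Args:
--         sequences: List of token-id lists.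
--         seq_len:   Output chunk length.
--         eos_id:    Token id used as document separator.
--
--     Returns:
--         List of fixed-length chunks.
--     """
--     if not sequences:
--         return []
--
--     # Build the full token stream
--     stream: List[int] = []
--     for seq in sequences:
--         stream.extend(seq)
--         stream.append(eos_id)
--
--     # Chunk into seq_len windows; discard the partial tail
--     chunks: List[List[int]] = []
--     for start in range(0, len(stream) - seq_len + 1, seq_len):
--         chunks.append(stream[start : start + seq_len])
--
--     return chunks
-- ===== SOURCE B (Python) =====
-- from typing import List
--
--
-- def pack_sequences(
--     sequences: List[List[int]],
--     seq_len: int,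
--     eos_id: int,
-- ) -> List[List[int]]:
--     """Streaming repack: never materialise the full token stream.
--
--     Keep a small running buffer; after folding in each sequence (plus its EOS),
--     cut off full seq_len windows immediately.  The leftover buffer at the end
--     is the discarded partial tail.
--     """
--     if not sequences or seq_len <= 0:
--         return []
--     chunks: List[List[int]] = []
--     buf: List[int] = []
--     for seq in sequences:
--         buf.extend(seq)
--         buf.append(eos_id)
--         while len(buf) >= seq_len:
--             chunks.append(buf[:seq_len])
--             buf = buf[seq_len:]
--     return chunks
-- ===== Notes on version B (the rewrite author's own statement) =====
-- stated objective: alternative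
-- what changed: Single streaming pass with a small running buffer that emits each full window as soon as it is complete, instead of first materialising the whole concatenated token stream and then re-slicing it with an index range; the partial tail is whatever remains in the buffer.
-- crash fix: On seq_len == 0 with non-empty sequences, A raises ValueError (range() step 0) while B returns []. — e.g. on pack_sequences([[1]], 0, 9): A raises ValueError, B returns []
import Mathlib
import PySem

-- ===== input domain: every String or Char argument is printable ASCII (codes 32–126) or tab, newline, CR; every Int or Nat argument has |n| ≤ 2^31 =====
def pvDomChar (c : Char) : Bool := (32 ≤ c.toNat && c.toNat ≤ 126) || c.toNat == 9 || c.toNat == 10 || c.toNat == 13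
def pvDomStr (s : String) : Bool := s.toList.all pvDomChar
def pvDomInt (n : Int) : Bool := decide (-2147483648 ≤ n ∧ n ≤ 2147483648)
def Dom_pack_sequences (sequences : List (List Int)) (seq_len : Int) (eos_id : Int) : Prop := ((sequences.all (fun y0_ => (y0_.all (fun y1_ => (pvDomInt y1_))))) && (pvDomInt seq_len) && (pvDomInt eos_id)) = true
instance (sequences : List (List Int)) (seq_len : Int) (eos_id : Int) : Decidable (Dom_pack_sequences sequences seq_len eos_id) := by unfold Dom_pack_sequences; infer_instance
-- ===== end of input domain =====

-- B streams: it keeps a small running buffer and emits each full window as soon as it is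
-- complete, instead of materialising the whole concatenated stream and slicing it by index;
-- equivalence is about the return value (neither program mutates its arguments).

-- ===== PORT A =====
def pack_sequences (sequences : List (List Int)) (seq_len : Int) (eos_id : Int) : List (List Int) :=
  if sequences = [] then []
  else
    -- stream.extend(seq); stream.append(eos_id)
    let stream : List Int := sequences.foldl (fun s seq => s ++ seq ++ [eos_id]) []
    -- for start in range(0, len(stream) - seq_len + 1, seq_len): chunks.append(stream[start:start+seq_len])
    (PySem.List.pyRange 0 ((stream.length : Int) - seq_len + 1) seq_len).foldl
      (fun chunks start => chunks ++ [PySem.List.slice stream (some start) (some (start + seq_len))]) []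

-- ===== PORT B =====
-- the inner `while len(buf) >= seq_len` loop of Source B (the `0 < seq_len` conjunct is a
-- totality guard only: B's Python reaches this loop only when seq_len > 0)
def packDrain (seq_len : Int) (chunks : List (List Int)) (buf : List Int) : List (List Int) × List Int :=
  if h : 0 < seq_len ∧ seq_len ≤ (buf.length : Int) then
    packDrain seq_len (chunks ++ [PySem.List.slice buf none (some seq_len)])
      (PySem.List.slice buf (some seq_len) none)
  else (chunks, buf)
termination_by buf.length
decreasing_by
  rw [PySem.List.slice_from buf (le_of_lt h.1)]
  simp only [List.length_drop]
  omega

def pack_sequences_alt (sequences : List (List Int)) (seq_len : Int) (eos_id : Int) : List (List Int) :=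
  if sequences = [] ∨ seq_len ≤ 0 then []
  else
    (sequences.foldl (fun st seq => packDrain seq_len st.1 (st.2 ++ seq ++ [eos_id]))
      (([] : List (List Int)), ([] : List Int))).1

-- ===== PRECONDITION & SPEC =====
-- Pre_ excludes only seq_len = 0 with non-empty sequences, where A raises ValueError (range step 0).
def Pre_pack_sequences (sequences : List (List Int)) (seq_len : Int) (eos_id : Int) : Prop :=
  sequences = [] ∨ seq_len ≠ 0
instance (sequences : List (List Int)) (seq_len : Int) (eos_id : Int) : Decidable (Pre_pack_sequences sequences seq_len eos_id) := by unfold Pre_pack_sequences; infer_instance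

def pvWitness_pack_sequences : List (List Int) × Int × Int := ([[1, 2], [3]], 3, 9)

-- On seq_len == 0 with non-empty sequences, A raises ValueError (range() step 0) while B returns [].
def Raises_pack_sequences (sequences : List (List Int)) (seq_len : Int) (eos_id : Int) : Prop :=
  sequences ≠ [] ∧ seq_len = 0
instance (sequences : List (List Int)) (seq_len : Int) (eos_id : Int) : Decidable (Raises_pack_sequences sequences seq_len eos_id) := by unfold Raises_pack_sequences; infer_instance
def pvRaiseWitness_pack_sequences : List (List Int) × Int × Int := ([[1]], 0, 9)
def pvRaiseWitnessOut_pack_sequences : List (List Int) := []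

def Spec_pack_sequences (sequences : List (List Int)) (seq_len : Int) (eos_id : Int) (out : List (List Int)) : Prop := out = pack_sequences_alt sequences seq_len eos_id
instance (sequences : List (List Int)) (seq_len : Int) (eos_id : Int) (out : List (List Int)) : Decidable (Spec_pack_sequences sequences seq_len eos_id out) := by unfold Spec_pack_sequences; infer_instance

-- ===== CLAIM (what is proved, stated in full; the proofs are below) =====
def Claim_equal_pack_sequences : Prop := ∀ (sequences : List (List Int)) (seq_len : Int) (eos_id : Int), Dom_pack_sequences sequences seq_len eos_id → Pre_pack_sequences sequences seq_len eos_id → Spec_pack_sequences sequences seq_len eos_id (pack_sequences sequences seq_len eos_id)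

def Claim_raises_pack_sequences : Prop := (∀ (sequences : List (List Int)) (seq_len : Int) (eos_id : Int), Dom_pack_sequences sequences seq_len eos_id → Raises_pack_sequences sequences seq_len eos_id → ¬ Pre_pack_sequences sequences seq_len eos_id) ∧ (Dom_pack_sequences (pvRaiseWitness_pack_sequences.1) (pvRaiseWitness_pack_sequences.2.1) (pvRaiseWitness_pack_sequences.2.2) ∧ Raises_pack_sequences (pvRaiseWitness_pack_sequences.1) (pvRaiseWitness_pack_sequences.2.1) (pvRaiseWitness_pack_sequences.2.2) ∧ pack_sequences_alt (pvRaiseWitness_pack_sequences.1) (pvRaiseWitness_pack_sequences.2.1) (pvRaiseWitness_pack_sequences.2.2) = pvRaiseWitnessOut_pack_sequences)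

-- ===== LEMMAS AND PROOFS =====

lemma packDrain_stop (seq_len : Int) (cs : List (List Int)) (buf : List Int)
    (h : ¬ (0 < seq_len ∧ seq_len ≤ (buf.length : Int))) :
    packDrain seq_len cs buf = (cs, buf) := by
  rw [packDrain.eq_def]; simp [h]

lemma packDrain_step (seq_len : Int) (cs : List (List Int)) (buf : List Int)
    (h : 0 < seq_len ∧ seq_len ≤ (buf.length : Int)) :
    packDrain seq_len cs buf
      = packDrain seq_len (cs ++ [buf.take seq_len.toNat]) (buf.drop seq_len.toNat) := by
  rw [packDrain.eq_def]
  simp only [h, and_self, dite_true]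
  rw [PySem.List.slice_to buf (le_of_lt h.1), PySem.List.slice_from buf (le_of_lt h.1)]

-- draining buf ++ ext is draining buf, then draining the leftover extended by ext
lemma packDrain_append (k : Int) (hk : 0 < k) (cs : List (List Int)) (buf ext : List Int) :
    packDrain k cs (buf ++ ext)
      = packDrain k (packDrain k cs buf).1 ((packDrain k cs buf).2 ++ ext) := by
  by_cases h : k ≤ (buf.length : Int)
  · rw [packDrain_step k cs buf ⟨hk, h⟩]
    have hlen : k ≤ ((buf ++ ext).length : Int) := by
      simp only [List.length_append]; push_cast; omega
    rw [packDrain_step k cs (buf ++ ext) ⟨hk, hlen⟩]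
    have hkn : k.toNat ≤ buf.length := by omega
    rw [List.take_append_of_le_length hkn, List.drop_append_of_le_length hkn]
    exact packDrain_append k hk (cs ++ [buf.take k.toNat]) (buf.drop k.toNat) ext
  · rw [packDrain_stop k cs buf (by omega)]
termination_by buf.length
decreasing_by simp only [List.length_drop]; omega

-- folding B's per-sequence step from a drained state = draining the whole accumulated stream
lemma fold_step_eq_drain (k : Int) (hk : 0 < k) (eos : Int) (seqs : List (List Int))
    (cs : List (List Int)) (buf : List Int) :
    seqs.foldl (fun st seq => packDrain k st.1 (st.2 ++ seq ++ [eos])) (packDrain k cs buf)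
      = packDrain k cs (seqs.foldl (fun s seq => s ++ seq ++ [eos]) buf) := by
  induction seqs generalizing cs buf with
  | nil => rfl
  | cons q rest ih =>
    simp only [List.foldl_cons]
    rw [List.append_assoc (packDrain k cs buf).2 q [eos],
      ← packDrain_append k hk cs buf (q ++ [eos]), List.append_assoc buf q [eos]]
    exact ih cs (buf ++ (q ++ [eos]))

-- characterisation of the drained chunks as fixed windows of buf
lemma packDrain_fst_char (k : Int) (hk : 0 < k) (cs : List (List Int)) (buf : List Int) :
    (packDrain k cs buf).1
      = cs ++ (List.range (buf.length / k.toNat)).map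
          (fun j => (buf.drop (k.toNat * j)).take k.toNat) := by
  by_cases h : k ≤ (buf.length : Int)
  · rw [packDrain_step k cs buf ⟨hk, h⟩,
      packDrain_fst_char k hk (cs ++ [buf.take k.toNat]) (buf.drop k.toNat)]
    have hkn : 0 < k.toNat := by omega
    have hle : k.toNat ≤ buf.length := by omega
    rw [Nat.div_eq_sub_div hkn hle, List.range_succ_eq_map]
    simp only [List.map_cons, List.map_map, List.length_drop, Nat.mul_zero, List.drop_zero,
      List.append_assoc, List.singleton_append]
    congr 1
    congr 1
    apply List.map_congr_left
    intro j _
    simp only [Function.comp_apply, List.drop_drop]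
    have hx : ∀ X Y : Nat, X = Y →
        (List.drop X buf).take k.toNat = (List.drop Y buf).take k.toNat := by
      intro X Y hXY; rw [hXY]
    apply hx
    rw [Nat.mul_succ, Nat.add_comm]
  · rw [packDrain_stop k cs buf (by omega)]
    have : buf.length / k.toNat = 0 := Nat.div_eq_of_lt (by omega)
    simp [this]
termination_by buf.length
decreasing_by simp only [List.length_drop]; omega

-- A's range-and-slice loop computes the same fixed windows
lemma afold_char (k : Int) (hk : 0 < k) (s : List Int) :
    (PySem.List.pyRange 0 ((s.length : Int) - k + 1) k).foldl
        (fun chunks start => chunks ++ [PySem.List.slice s (some start) (some (start + k))]) []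
      = (List.range (s.length / k.toNat)).map (fun j => (s.drop (k.toNat * j)).take k.toNat) := by
  obtain ⟨n, rfl⟩ : ∃ n : Nat, k = (n : Int) := ⟨k.toNat, by omega⟩
  have hn : 0 < n := by exact_mod_cast hk
  rw [PySem.List.pyRange_of_pos 0 ((s.length : Int) - n + 1) hk]
  have hcount : (if (0 : Int) < (s.length : Int) - n + 1
      then ((((s.length : Int) - n + 1) - 0 + n - 1) / n).toNat else 0) = s.length / n := by
    by_cases hc : (0 : Int) < (s.length : Int) - n + 1
    · simp only [hc, if_true]
      have he : ((s.length : Int) - n + 1) - 0 + n - 1 = ((s.length : Nat) : Int) := by ring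
      rw [he]
      calc ((s.length : Int) / (n : Int)).toNat
          = (((s.length / n : Nat) : Int)).toNat := by rw [Int.natCast_div]
        _ = s.length / n := Int.toNat_natCast _
    · simp only [hc, if_false]
      exact (Nat.div_eq_of_lt (by omega)).symm
  rw [hcount, List.foldl_map, PySem.List.foldl_append_singleton_eq_map]
  simp only [Int.toNat_natCast]
  apply List.map_congr_left
  intro j _
  rw [show (0 : Int) + (n : Int) * (j : Int) + n = ((n * j : Nat) : Int) + ((n : Nat) : Int) by
        push_cast; ring,
      show (0 : Int) + (n : Int) * (j : Int) = ((n * j : Nat) : Int) by push_cast; ring,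
    PySem.List.slice_natCast_add]

-- for a negative step and nonnegative stop, range(0, stop, step) is empty
lemma pyRange_neg_step_nil (b k : Int) (hb : 0 ≤ b) (hk : k < 0) :
    PySem.List.pyRange 0 b k = [] := by
  simp only [PySem.List.pyRange]
  have h0 : ¬ k = 0 := by omega
  have h1 : ¬ (0 < k) := by omega
  have h2 : ¬ (b < 0) := by omega
  simp [h0, h1, h2]

-- ===== VERDICT (by name: the statement is the Claim_ definition above) =====
theorem pack_sequences_spec : Claim_equal_pack_sequences := by
  intro seqs k eos _ hpre
  unfold Spec_pack_sequences
  simp only [pack_sequences, pack_sequences_alt]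
  by_cases hs : seqs = []
  · simp [hs]
  · rw [if_neg hs]
    rcases lt_trichotomy k 0 with hk | hk | hk
    · -- negative seq_len: A's range is empty, B's guard fires
      rw [if_pos (Or.inr (le_of_lt hk))]
      have hb : (0:Int) ≤ ((seqs.foldl (fun s seq => s ++ seq ++ [eos]) []).length : Int) - k + 1 := by
        have h0 : (0:Int) ≤ ((seqs.foldl (fun s seq => s ++ seq ++ [eos]) []).length : Int) :=
          Int.natCast_nonneg _
        omega
      rw [pyRange_neg_step_nil _ k hb hk]
      rfl
    · exact absurd hk (hpre.resolve_left hs)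
    · -- positive seq_len
      rw [if_neg (by rintro (h | h)
                     · exact hs h
                     · omega)]
      rw [afold_char k hk]
      have h0 : (([] : List (List Int)), ([] : List Int)) = packDrain k [] [] := by
        rw [packDrain_stop k [] [] (by rintro ⟨h1, h2⟩; simp at h2; omega)]
      rw [h0, fold_step_eq_drain k hk eos seqs [] [],
        packDrain_fst_char k hk [] (seqs.foldl (fun s seq => s ++ seq ++ [eos]) [])]
      simp

def pack_sequences_raises : Claim_raises_pack_sequences := by
  unfold Claim_raises_pack_sequences
  constructor
  · intro seqs k eos _ hr
    unfold Raises_pack_sequences at hr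
    unfold Pre_pack_sequences
    tauto
  · exact ⟨by decide, by decide, by decide⟩
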